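-- pv_equiv track=rewrite | github.com/Gvozdyara/Vocabulary_builder | vocabulary_builder.py | split_file_to_double_list
-- ===== SOURCE A (Python) =====
-- def split_file_to_double_list(string):
--     integer = ['0', '1', '2', '3', '4', '5', '6', '7', '8', '9']
--     count_list = []
--     word_list = []
--     i = 0
--     count = ''
--     word = ''
--
--     while i < len(string):
--         if string[i] in integer:
--             count = count + string[i]
--             i += 1
--         elif string[i] == ',':
--             i += 1
--         elif string[i] != '\n':
--             word = word + string[i]
--             i += 1
--         elif string[i] == '\n' or i + 1 == len(string):
--             count_list.append(count)
--             word_list.append(word)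
--             word = ''
--             count = ''
--             i += 1
--         else:
--             i += 1
--     return count_list, word_list  # на выходе два списка - число и слово
-- ===== SOURCE B (Python) =====
-- def split_file_to_double_list(string):
--     count_list = []
--     word_list = []
--     for seg in string.split('\n')[:-1]:
--         count_list.append(''.join(c for c in seg if c in '0123456789'))
--         word_list.append(''.join(c for c in seg if c not in '0123456789' and c != ','))
--     return count_list, word_list
-- ===== Notes on version B (the rewrite author's own statement) =====
-- stated objective: simpler
-- what changed: Replaces the indexed character-by-character state machine with a split-on-newline-then-filter-each-segment decomposition (dropping the trailing unterminated record, which A never appends); str.split plus join-of-filter also avoids A's repeated quadratic string concatenation.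
import Mathlib
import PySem

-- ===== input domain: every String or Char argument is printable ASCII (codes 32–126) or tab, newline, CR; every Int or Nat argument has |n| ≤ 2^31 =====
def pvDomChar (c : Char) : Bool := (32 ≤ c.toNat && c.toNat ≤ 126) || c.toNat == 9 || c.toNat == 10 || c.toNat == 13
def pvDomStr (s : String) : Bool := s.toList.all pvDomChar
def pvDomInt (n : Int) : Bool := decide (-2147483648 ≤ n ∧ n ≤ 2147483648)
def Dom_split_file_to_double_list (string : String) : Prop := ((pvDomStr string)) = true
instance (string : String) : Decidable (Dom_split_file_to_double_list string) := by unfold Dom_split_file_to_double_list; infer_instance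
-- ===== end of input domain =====

-- B replaces A's indexed character state machine with split-on-'\n'-then-filter-each-segment (simpler decomposition; same cost).


-- ===== PORT A =====
def pvInteger : List Char := ['0','1','2','3','4','5','6','7','8','9']

-- A's while-loop over indices, as structural recursion over the remaining characters;
-- the string accumulators count/word are carried as List Char and materialised with String.mk on flush.
def pvLoopA : List Char → List Char → List Char → List String × List String
  | [], _, _ => ([], [])
  | c :: rest, count, word =>
    if c ∈ pvInteger then pvLoopA rest (count ++ [c]) word
    else if c = ',' then pvLoopA rest count word
    else if c ≠ '\n' then pvLoopA rest count (word ++ [c])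
    else
      let r := pvLoopA rest [] []
      (String.mk count :: r.1, String.mk word :: r.2)

def split_file_to_double_list (string : String) : List String × List String :=
  pvLoopA string.toList [] []

-- ===== PORT B =====
-- Python's str.split('\n') ported by hand over the character list (exact: '' splits to ['']).
def pvSplitNl : List Char → List (List Char)
  | [] => [[]]
  | c :: rest =>
    if c = '\n' then [] :: pvSplitNl rest
    else match pvSplitNl rest with
      | [] => [[c]]
      | s :: ss => (c :: s) :: ss

def pvFilterDig (seg : List Char) : String := String.mk (seg.filter (· ∈ pvInteger))
def pvFilterWrd (seg : List Char) : String := String.mk (seg.filter (fun c => c ∉ pvInteger ∧ c ≠ ','))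

def split_file_to_double_list_alt (string : String) : List String × List String :=
  let segs := (pvSplitNl string.toList).dropLast   -- segments[:-1]
  (segs.map pvFilterDig, segs.map pvFilterWrd)

-- ===== PRECONDITION & SPEC =====
def Spec_split_file_to_double_list (string : String) (out : List String × List String) : Prop := out = split_file_to_double_list_alt string
instance (string : String) (out : List String × List String) : Decidable (Spec_split_file_to_double_list string out) := by unfold Spec_split_file_to_double_list; infer_instance

-- ===== CLAIM (what is proved, stated in full; the proofs are below) =====
def Claim_equal_split_file_to_double_list : Prop := ∀ (string : String), Dom_split_file_to_double_list string → Spec_split_file_to_double_list string (split_file_to_double_list string)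

-- ===== LEMMAS AND PROOFS =====
def pvFilterDigL (seg : List Char) : List Char := seg.filter (· ∈ pvInteger)
def pvFilterWrdL (seg : List Char) : List Char := seg.filter (fun c => c ∉ pvInteger ∧ c ≠ ',')

-- A's loop result, expressed over the segment decomposition: the pending (already sifted)
-- accumulators are prepended to the filtered first segment.
def pvCombine (count word : List Char) : List (List Char) → List String × List String
  | [] => ([], [])
  | s :: ss => (String.mk (count ++ pvFilterDigL s) :: ss.map pvFilterDig,
                String.mk (word ++ pvFilterWrdL s) :: ss.map pvFilterWrd)

theorem pvSplitNl_ne_nil (cs : List Char) : pvSplitNl cs ≠ [] := by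
  cases cs with
  | nil => simp [pvSplitNl]
  | cons c rest =>
    simp only [pvSplitNl]
    split
    · simp
    · split <;> simp

theorem pvCombine_nil_nil (segs : List (List Char)) :
    pvCombine [] [] segs = (segs.map pvFilterDig, segs.map pvFilterWrd) := by
  cases segs <;> simp [pvCombine, pvFilterDig, pvFilterWrd, pvFilterDigL, pvFilterWrdL]

theorem pvLoopA_eq_combine (cs count word : List Char) :
    pvLoopA cs count word = pvCombine count word ((pvSplitNl cs).dropLast) := by
  induction cs generalizing count word with
  | nil => simp [pvLoopA, pvSplitNl, pvCombine]
  | cons c rest ih =>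
    obtain ⟨s, ss, hsplit⟩ : ∃ s ss, pvSplitNl rest = s :: ss := by
      cases h : pvSplitNl rest with
      | nil => exact absurd h (pvSplitNl_ne_nil rest)
      | cons s ss => exact ⟨s, ss, rfl⟩
    by_cases hdig : c ∈ pvInteger
    · have hc : c = '0' ∨ c = '1' ∨ c = '2' ∨ c = '3' ∨ c = '4' ∨ c = '5' ∨ c = '6' ∨
          c = '7' ∨ c = '8' ∨ c = '9' := by simpa [pvInteger] using hdig
      have hn : c ≠ '\n' := by
        rcases hc with rfl | rfl | rfl | rfl | rfl | rfl | rfl | rfl | rfl | rfl <;> decide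
      rw [show pvLoopA (c :: rest) count word = pvLoopA rest (count ++ [c]) word by
        simp [pvLoopA, hdig]]
      rw [ih]
      simp only [pvSplitNl, if_neg hn, hsplit]
      cases ss with
      | nil => simp [pvCombine]
      | cons t ts =>
        simp [pvCombine, pvFilterDigL, pvFilterWrdL, hdig]
    · by_cases hcomma : c = ','
      · subst hcomma
        rw [show pvLoopA (',' :: rest) count word = pvLoopA rest count word by
          simp [pvLoopA, hdig]]
        rw [ih]
        simp only [pvSplitNl, hsplit]
        rw [if_neg (by decide)]
        cases ss with
        | nil => simp [pvCombine]
        | cons t ts =>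
          simp [pvCombine, pvFilterDigL, pvFilterWrdL, hdig]
      · by_cases hn : c = '\n'
        · subst hn
          rw [show pvLoopA ('\n' :: rest) count word =
              (String.mk count :: (pvLoopA rest [] []).1,
               String.mk word :: (pvLoopA rest [] []).2) by
            simp [pvLoopA, hdig, hcomma]]
          rw [ih]
          simp only [pvSplitNl, hsplit]
          cases ss with
          | nil => simp [pvCombine, pvFilterDigL, pvFilterWrdL]
          | cons t ts =>
            simp [pvCombine, pvFilterDigL, pvFilterWrdL, pvFilterDig, pvFilterWrd,
              List.map_dropLast]
        · rw [show pvLoopA (c :: rest) count word = pvLoopA rest count (word ++ [c]) by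
            simp [pvLoopA, hdig, hcomma, hn]]
          rw [ih]
          simp only [pvSplitNl, if_neg hn, hsplit]
          cases ss with
          | nil => simp [pvCombine]
          | cons t ts =>
            simp [pvCombine, pvFilterDigL, pvFilterWrdL, hdig, hcomma]

-- ===== VERDICT (by name: the statement is the Claim_ definition above) =====
theorem split_file_to_double_list_spec : Claim_equal_split_file_to_double_list := by
  intro s _
  show split_file_to_double_list s = split_file_to_double_list_alt s
  unfold split_file_to_double_list split_file_to_double_list_alt
  rw [pvLoopA_eq_combine, pvCombine_nil_nil]
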